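-- pv_equiv track=rewrite | github.com/KevFranck/cesoc_print_system | desktop/app/services/print_service.py | resolve_page_selection
-- ===== SOURCE A (Python) =====
-- def resolve_page_selection(total_pages: int, raw_selection: str | None) -> tuple[str | None, int]:
--     """Valide une saisie de type `1-3,5` et renvoie une version normalisee."""
--
--     if not raw_selection or not raw_selection.strip():
--         return None, total_pages
--
--     selected_pages: set[int] = set()
--     parts = [part.strip() for part in raw_selection.split(",") if part.strip()]
--     if not parts:
--         raise ValueError("La selection de pages est vide ou invalide.")
--
--     for part in parts:
--         if "-" in part:
--             start_raw, end_raw = [item.strip() for item in part.split("-", 1)]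
--             if not start_raw.isdigit() or not end_raw.isdigit():
--                 raise ValueError("Une plage de pages est invalide.")
--             start, end = int(start_raw), int(end_raw)
--             if start < 1 or end < start or end > total_pages:
--                 raise ValueError("La plage de pages depasse le nombre de pages du document.")
--             selected_pages.update(range(start, end + 1))
--         else:
--             if not part.isdigit():
--                 raise ValueError("Une page selectionnee est invalide.")
--             page_number = int(part)
--             if page_number < 1 or page_number > total_pages:
--                 raise ValueError("La selection de pages depasse le nombre de pages du document.")
--             selected_pages.add(page_number)
--
--     normalized = ",".join(str(page_number) for page_number in sorted(selected_pages))
--     return normalized, len(selected_pages)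
-- ===== SOURCE B (Python) =====
-- def resolve_page_selection(total_pages: int, raw_selection: str | None) -> tuple[str | None, int]:
--     """Valide une saisie de type `1-3,5` et renvoie une version normalisee."""
--
--     text = raw_selection or ""
--     if not text.strip():
--         return None, total_pages
--
--     chunks = [c.strip() for c in text.split(",") if c.strip()]
--     if not chunks:
--         raise ValueError("La selection de pages est vide ou invalide.")
--
--     intervals = sorted((_interval(c, total_pages) for c in chunks), key=lambda iv: iv[0])
--
--     merged: list[tuple[int, int]] = []
--     lo, hi = intervals[0]
--     for a, b in intervals[1:]:
--         if a > hi + 1: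
--             merged.append((lo, hi))
--             lo, hi = a, b
--         elif b > hi:
--             hi = b
--     merged.append((lo, hi))
--
--     pages = [p for lo, hi in merged for p in range(lo, hi + 1)]
--     return ",".join(map(str, pages)), len(pages)
--
--
-- def _interval(chunk: str, total_pages: int) -> tuple[int, int]:
--     if "-" in chunk:
--         lo_s, hi_s = [b.strip() for b in chunk.split("-", 1)]
--     else:
--         lo_s = hi_s = chunk
--     if not (lo_s.isdigit() and hi_s.isdigit()):
--         raise ValueError("Selection de pages invalide.")
--     lo, hi = int(lo_s), int(hi_s)
--     if not (1 <= lo <= hi <= total_pages):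
--         raise ValueError("La selection depasse le nombre de pages du document.")
--     return lo, hi
-- ===== Notes on version B (the rewrite author's own statement) =====
-- stated objective: alternative
-- what changed: B parses each comma-chunk once through a single unified validator into a (start,end) interval, sorts the few intervals, merges overlapping/adjacent ones in one scan, and emits the pages in order from the merged intervals, instead of A's two-branch loop that accumulates every individual page into a set which is then sorted.
import Mathlib
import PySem

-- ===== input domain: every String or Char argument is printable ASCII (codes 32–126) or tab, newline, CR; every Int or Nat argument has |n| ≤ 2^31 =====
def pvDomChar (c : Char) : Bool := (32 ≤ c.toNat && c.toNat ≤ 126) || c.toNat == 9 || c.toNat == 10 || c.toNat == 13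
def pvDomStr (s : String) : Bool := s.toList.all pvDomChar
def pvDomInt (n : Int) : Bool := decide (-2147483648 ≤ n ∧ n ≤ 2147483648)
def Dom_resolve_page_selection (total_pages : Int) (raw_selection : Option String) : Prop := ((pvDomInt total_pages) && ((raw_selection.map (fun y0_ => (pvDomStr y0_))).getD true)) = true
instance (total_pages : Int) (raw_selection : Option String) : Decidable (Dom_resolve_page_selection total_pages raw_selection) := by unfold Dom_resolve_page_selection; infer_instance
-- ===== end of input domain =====

-- B parses each chunk once through a unified validator into a (start,end) interval, sorts and
-- merges the intervals, and emits the pages by one ordered scan, instead of A's two-branch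
-- loop accumulating every page into a set that is then sorted (objective: alternative).

-- shared parse helper: [c.strip() for c in text.split(",") if c.strip()]
def pvParts (text : String) : List String :=
  (((PySem.Str.split? text ",").getD []).map PySem.Str.strip).filter (fun p => p ≠ "")

-- ===== PORT A =====
-- one iteration of A's validation loop over the set of selected pages (none = ValueError raised)
def pvAStep (total : Int) (st : Option (PySem.Set Int)) (part : String) : Option (PySem.Set Int) :=
  match st with
  | none => none
  | some S =>
    if PySem.Str.isIn "-" part then
      match ((PySem.Str.splitMax? part "-" 1).getD []).map PySem.Str.strip with
      | [start_raw, end_raw] =>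
        if !(PySem.Str.strIsdigit start_raw) || !(PySem.Str.strIsdigit end_raw) then none
        else
          let start := (PySem.Int.ofStr? start_raw).getD 0
          let stop := (PySem.Int.ofStr? end_raw).getD 0
          if start < 1 ∨ stop < start ∨ stop > total then none
          else some (PySem.Set.update S (PySem.List.pyRange start (stop + 1) 1))
      | _ => none      -- unreachable: split("-",1) with "-" present yields two pieces
    else
      if !(PySem.Str.strIsdigit part) then none
      else
        let page := (PySem.Int.ofStr? part).getD 0
        if page < 1 ∨ page > total then none
        else some (PySem.Set.add S page)

def resolve_page_selection (total_pages : Int) (raw_selection : Option String) : Option String × Int :=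
  match raw_selection with
  | none => (none, total_pages)
  | some raw =>
    if PySem.Str.strip raw = "" then (none, total_pages)
    else
      let parts := pvParts raw
      if parts = [] then (none, total_pages)      -- raise path, excluded by Pre_
      else
        match parts.foldl (pvAStep total_pages) (some PySem.Set.empty) with
        | none => (none, total_pages)             -- raise path, excluded by Pre_
        | some S =>
          (some (PySem.Str.join ","
                  ((PySem.List.sorted S (fun x => x) false).map PySem.Int.toStr)),
           PySem.Set.len S)

-- ===== PORT B =====
-- _interval(chunk, total_pages): the validated (lo, hi) interval of one chunk (none = ValueError)
def pvInterval? (total : Int) (chunk : String) : Option (Int × Int) :=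
  match (if PySem.Str.isIn "-" chunk
         then ((PySem.Str.splitMax? chunk "-" 1).getD []).map PySem.Str.strip
         else [chunk, chunk]) with
  | [lo_s, hi_s] =>
    if !(PySem.Str.strIsdigit lo_s && PySem.Str.strIsdigit hi_s) then none
    else
      let lo := (PySem.Int.ofStr? lo_s).getD 0
      let hi := (PySem.Int.ofStr? hi_s).getD 0
      if !(decide (1 ≤ lo ∧ lo ≤ hi ∧ hi ≤ total)) then none else some (lo, hi)
  | _ => none      -- unreachable

-- one iteration of B's merge loop; state = (merged so far, lo, hi)
def pvMergeStep (acc : List (Int × Int) × Int × Int) (iv : Int × Int) : List (Int × Int) × Int × Int :=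
  if acc.2.2 + 1 < iv.1 then (acc.1 ++ [(acc.2.1, acc.2.2)], iv.1, iv.2)
  else if acc.2.2 < iv.2 then (acc.1, acc.2.1, iv.2)
  else acc

def resolve_page_selection_alt (total_pages : Int) (raw_selection : Option String) : Option String × Int :=
  let text := raw_selection.getD ""
  if PySem.Str.strip text = "" then (none, total_pages)
  else
    let chunks := pvParts text
    if chunks = [] then (none, total_pages)       -- raise path, excluded by Pre_
    else
      match chunks.mapM (pvInterval? total_pages) with
      | none => (none, total_pages)               -- raise path, excluded by Pre_
      | some ivs =>
        match PySem.List.sorted ivs (fun iv => iv.1) false with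
        | [] => (none, total_pages)               -- unreachable: one interval per chunk
        | iv0 :: rest =>
          let fin := rest.foldl pvMergeStep ([], iv0.1, iv0.2)
          let merged := fin.1 ++ [(fin.2.1, fin.2.2)]
          let pages := merged.flatMap (fun iv => PySem.List.pyRange iv.1 (iv.2 + 1) 1)
          (some (PySem.Str.join "," (pages.map PySem.Int.toStr)), (pages.length : Int))

-- ===== PRECONDITION & SPEC =====
-- validity of one comma-chunk: a page number or a page range, within 1..total
def pvPartOk (total : Int) (part : String) : Bool :=
  if PySem.Str.isIn "-" part then
    match ((PySem.Str.splitMax? part "-" 1).getD []).map PySem.Str.strip with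
    | [start_raw, end_raw] =>
      PySem.Str.strIsdigit start_raw && PySem.Str.strIsdigit end_raw &&
        decide (1 ≤ (PySem.Int.ofStr? start_raw).getD 0 ∧
                (PySem.Int.ofStr? start_raw).getD 0 ≤ (PySem.Int.ofStr? end_raw).getD 0 ∧
                (PySem.Int.ofStr? end_raw).getD 0 ≤ total)
    | _ => false
  else
    PySem.Str.strIsdigit part &&
      decide (1 ≤ (PySem.Int.ofStr? part).getD 0 ∧ (PySem.Int.ofStr? part).getD 0 ≤ total)

-- Pre_ excludes exactly the inputs on which A raises ValueError: a non-blank selection that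
-- has no non-blank comma-chunk, or that has an invalid / out-of-bounds chunk.
def Pre_resolve_page_selection (total_pages : Int) (raw_selection : Option String) : Prop :=
  PySem.Str.strip (raw_selection.getD "") = "" ∨
    (pvParts (raw_selection.getD "") ≠ [] ∧
     ∀ p ∈ pvParts (raw_selection.getD ""), pvPartOk total_pages p = true)
instance (total_pages : Int) (raw_selection : Option String) : Decidable (Pre_resolve_page_selection total_pages raw_selection) := by unfold Pre_resolve_page_selection; infer_instance

def pvWitness_resolve_page_selection : Int × Option String := (10, some "1-3,5")

def Spec_resolve_page_selection (total_pages : Int) (raw_selection : Option String) (out : Option String × Int) : Prop := out = resolve_page_selection_alt total_pages raw_selection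
instance (total_pages : Int) (raw_selection : Option String) (out : Option String × Int) : Decidable (Spec_resolve_page_selection total_pages raw_selection out) := by unfold Spec_resolve_page_selection; infer_instance

-- ===== CLAIM (what is proved, stated in full; the proofs are below) =====
def Claim_equal_resolve_page_selection : Prop := ∀ (total_pages : Int) (raw_selection : Option String), Dom_resolve_page_selection total_pages raw_selection → Pre_resolve_page_selection total_pages raw_selection → Spec_resolve_page_selection total_pages raw_selection (resolve_page_selection total_pages raw_selection)

-- ===== LEMMAS AND PROOFS =====

-- the interval a valid chunk denotes
def pvToIv (part : String) : Int × Int :=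
  if PySem.Str.isIn "-" part then
    match ((PySem.Str.splitMax? part "-" 1).getD []).map PySem.Str.strip with
    | [start_raw, end_raw] => ((PySem.Int.ofStr? start_raw).getD 0, (PySem.Int.ofStr? end_raw).getD 0)
    | _ => (0, 0)
  else ((PySem.Int.ofStr? part).getD 0, (PySem.Int.ofStr? part).getD 0)

theorem pvToIv_valid (total : Int) (p : String) (h : pvPartOk total p = true) :
    1 ≤ (pvToIv p).1 ∧ (pvToIv p).1 ≤ (pvToIv p).2 ∧ (pvToIv p).2 ≤ total := by
  unfold pvPartOk at h
  unfold pvToIv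
  split at h
  · rename_i hin
    rw [if_pos hin]
    split at h
    · simp only [Bool.and_eq_true, decide_eq_true_eq] at h
      exact ⟨h.2.1, h.2.2.1, h.2.2.2⟩
    · simp at h
  · rename_i hin
    rw [if_neg hin]
    simp only [Bool.and_eq_true, decide_eq_true_eq] at h
    exact ⟨h.2.1, le_refl _, h.2.2⟩

theorem pvAStep_ok (total : Int) (S : PySem.Set Int) (p : String) (h : pvPartOk total p = true) :
    pvAStep total (some S) p
      = some (PySem.Set.update S (PySem.List.pyRange (pvToIv p).1 ((pvToIv p).2 + 1) 1)) := by
  unfold pvPartOk at h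
  simp only [pvAStep]
  unfold pvToIv
  split at h
  · rename_i hin
    rw [if_pos hin, if_pos hin]
    split at h
    · simp only [Bool.and_eq_true, decide_eq_true_eq] at h
      obtain ⟨⟨hd1, hd2⟩, hb⟩ := h
      simp only [hd1, hd2, Bool.not_true, Bool.or_self, Bool.false_eq_true, if_false]
      rw [if_neg (by omega)]
    · simp at h
  · rename_i hin
    rw [if_neg hin, if_neg hin]
    simp only [Bool.and_eq_true, decide_eq_true_eq] at h
    obtain ⟨hd, hb⟩ := h
    simp only [hd, Bool.not_true, Bool.false_eq_true, if_false]
    rw [if_neg (by omega)]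
    rw [PySem.List.pyRange_one_singleton]
    simp [PySem.Set.update]

theorem pvInterval?_ok (total : Int) (p : String) (h : pvPartOk total p = true) :
    pvInterval? total p = some (pvToIv p) := by
  unfold pvPartOk at h
  simp only [pvInterval?]
  unfold pvToIv
  split at h
  · rename_i hin
    rw [if_pos hin, if_pos hin]
    split at h
    · simp only [Bool.and_eq_true, decide_eq_true_eq] at h
      obtain ⟨⟨hd1, hd2⟩, hb⟩ := h
      simp only [hd1, hd2, Bool.and_self, Bool.not_true, Bool.false_eq_true, if_false]
      rw [if_neg (by simp; omega)]
    · simp at h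
  · rename_i hin
    rw [if_neg hin, if_neg hin]
    simp only [Bool.and_eq_true, decide_eq_true_eq] at h
    obtain ⟨hd, hb⟩ := h
    simp only [hd, Bool.and_self, Bool.not_true, Bool.false_eq_true, if_false]
    rw [if_neg (by simp; omega)]

theorem pvAfold (total : Int) (parts : List String) (S : PySem.Set Int)
    (h : ∀ p ∈ parts, pvPartOk total p = true) :
    parts.foldl (pvAStep total) (some S)
      = some ((parts.map pvToIv).foldl
          (fun S iv => PySem.Set.update S (PySem.List.pyRange iv.1 (iv.2 + 1) 1)) S) := by
  induction parts generalizing S with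
  | nil => simp
  | cons p t ih =>
    rw [List.foldl_cons, List.map_cons, List.foldl_cons,
      pvAStep_ok total S p (h p (by simp))]
    exact ih _ (fun q hq => h q (by simp [hq]))

theorem pvBmapM (total : Int) (parts : List String)
    (h : ∀ p ∈ parts, pvPartOk total p = true) :
    parts.mapM (pvInterval? total) = some (parts.map pvToIv) := by
  induction parts with
  | nil => simp
  | cons p t ih =>
    rw [List.mapM_cons, pvInterval?_ok total p (h p (by simp)),
      ih (fun q hq => h q (by simp [hq]))]
    rfl

theorem pvMemAfold (ivs : List (Int × Int)) (S : PySem.Set Int) (x : Int) :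
    x ∈ ivs.foldl (fun S iv => PySem.Set.update S (PySem.List.pyRange iv.1 (iv.2 + 1) 1)) S
      ↔ x ∈ S ∨ ∃ iv ∈ ivs, iv.1 ≤ x ∧ x ≤ iv.2 := by
  induction ivs generalizing S with
  | nil => simp
  | cons a t ih =>
    rw [List.foldl_cons, ih]
    simp only [PySem.Set.mem_update, PySem.List.mem_pyRange_one, List.mem_cons]
    constructor
    · rintro (h | h)
      · rcases h with h | h
        · exact Or.inl h
        · exact Or.inr ⟨a, Or.inl rfl, h.1, by omega⟩
      · obtain ⟨iv, hm, hx⟩ := h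
        exact Or.inr ⟨iv, Or.inr hm, hx⟩
    · rintro (h | ⟨iv, (rfl | hm), hx⟩)
      · exact Or.inl (Or.inl h)
      · exact Or.inl (Or.inr ⟨hx.1, by omega⟩)
      · exact Or.inr ⟨iv, hm, hx⟩

theorem pvNodupAfold (ivs : List (Int × Int)) (S : PySem.Set Int) (h : S.Nodup) :
    (ivs.foldl (fun S iv => PySem.Set.update S (PySem.List.pyRange iv.1 (iv.2 + 1) 1)) S).Nodup := by
  induction ivs generalizing S with
  | nil => simpa
  | cons a t ih =>
    rw [List.foldl_cons]
    exact ih _ (PySem.Set.nodup_update _ _ h)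

-- the merge loop's result, merged list included
def pvRun (rest : List (Int × Int)) (cs ce : Int) : List (Int × Int) :=
  let fin := rest.foldl pvMergeStep ([], cs, ce)
  fin.1 ++ [(fin.2.1, fin.2.2)]

theorem pvMergeShift (rest : List (Int × Int)) (m : List (Int × Int)) (cs ce : Int) :
    rest.foldl pvMergeStep (m, cs, ce)
      = (m ++ (rest.foldl pvMergeStep ([], cs, ce)).1, (rest.foldl pvMergeStep ([], cs, ce)).2) := by
  induction rest generalizing m cs ce with
  | nil => simp
  | cons a t ih =>
    simp only [List.foldl_cons, pvMergeStep]
    by_cases h1 : ce + 1 < a.1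
    · rw [if_pos h1, if_pos h1]
      rw [ih (m ++ [(cs, ce)]) a.1 a.2, ih ([] ++ [(cs, ce)]) a.1 a.2]
      simp
    · rw [if_neg h1, if_neg h1]
      by_cases h2 : ce < a.2
      · rw [if_pos h2, if_pos h2]; exact ih m cs a.2
      · rw [if_neg h2, if_neg h2]; exact ih m cs ce

theorem pvRunSpec (rest : List (Int × Int)) (cs ce : Int) (hle : cs ≤ ce)
    (hv : ∀ iv ∈ rest, iv.1 ≤ iv.2 ∧ cs ≤ iv.1)
    (hs : rest.Pairwise (fun a b => a.1 ≤ b.1)) :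
    (∀ iv ∈ pvRun rest cs ce, iv.1 ≤ iv.2) ∧
    (∀ iv ∈ pvRun rest cs ce, cs ≤ iv.1) ∧
    (pvRun rest cs ce).Pairwise (fun a b => a.2 + 1 < b.1) ∧
    (∀ x, (∃ iv ∈ pvRun rest cs ce, iv.1 ≤ x ∧ x ≤ iv.2)
            ↔ (cs ≤ x ∧ x ≤ ce) ∨ ∃ iv ∈ rest, iv.1 ≤ x ∧ x ≤ iv.2) := by
  induction rest generalizing cs ce with
  | nil =>
    refine ⟨by simpa [pvRun] using hle, by simp [pvRun], by simp [pvRun], fun x => ?_⟩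
    simp [pvRun]
  | cons a t ih =>
    have hv0 := hv a (by simp)
    rw [List.pairwise_cons] at hs
    obtain ⟨ha, hs'⟩ := hs
    have hvt : ∀ iv ∈ t, iv.1 ≤ iv.2 ∧ cs ≤ iv.1 := fun iv hiv => hv iv (by simp [hiv])
    by_cases h1 : ce + 1 < a.1
    · have heq : pvRun (a :: t) cs ce = (cs, ce) :: pvRun t a.1 a.2 := by
        unfold pvRun
        simp only [List.foldl_cons, pvMergeStep, if_pos h1]
        rw [pvMergeShift t ([] ++ [(cs, ce)]) a.1 a.2]
        simp
      rw [heq]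
      have ih' := ih a.1 a.2 hv0.1 (fun iv hiv => ⟨(hvt iv hiv).1, ha iv hiv⟩) hs'
      refine ⟨?_, ?_, ?_, fun x => ?_⟩
      · intro iv hiv
        rcases List.mem_cons.mp hiv with rfl | hm
        · exact hle
        · exact ih'.1 iv hm
      · intro iv hiv
        rcases List.mem_cons.mp hiv with rfl | hm
        · exact le_refl _
        · have := ih'.2.1 iv hm
          omega
      · rw [List.pairwise_cons]
        refine ⟨fun iv hm => ?_, ih'.2.2.1⟩
        have := ih'.2.1 iv hm
        omega
      · constructor
        · rintro ⟨iv, hm, hx⟩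
          rcases List.mem_cons.mp hm with rfl | hm'
          · exact Or.inl hx
          · rcases (ih'.2.2.2 x).mp ⟨iv, hm', hx⟩ with h | ⟨jv, hj, hxj⟩
            · exact Or.inr ⟨a, by simp, h⟩
            · exact Or.inr ⟨jv, by simp [hj], hxj⟩
        · rintro (hx | ⟨iv, hm, hx⟩)
          · exact ⟨(cs, ce), by simp, hx⟩
          · rcases List.mem_cons.mp hm with rfl | hm'
            · obtain ⟨jv, hj, hxj⟩ := (ih'.2.2.2 x).mpr (Or.inl hx)
              exact ⟨jv, by simp [hj], hxj⟩
            · obtain ⟨jv, hj, hxj⟩ := (ih'.2.2.2 x).mpr (Or.inr ⟨iv, hm', hx⟩)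
              exact ⟨jv, by simp [hj], hxj⟩
    · by_cases h2 : ce < a.2
      · have heq : pvRun (a :: t) cs ce = pvRun t cs a.2 := by
          unfold pvRun
          simp only [List.foldl_cons, pvMergeStep, if_neg h1, if_pos h2]
        rw [heq]
        have ih' := ih cs a.2 (by omega) (fun iv hiv => (hvt iv hiv)) hs'
        refine ⟨ih'.1, ih'.2.1, ih'.2.2.1, fun x => ?_⟩
        rw [ih'.2.2.2 x]
        constructor
        · rintro (⟨hx1, hx2⟩ | ⟨iv, hm, hx⟩)
          · by_cases hce : x ≤ ce
            · exact Or.inl ⟨hx1, hce⟩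
            · exact Or.inr ⟨a, by simp, by omega, hx2⟩
          · exact Or.inr ⟨iv, by simp [hm], hx⟩
        · rintro (⟨hx1, hx2⟩ | ⟨iv, hm, hx⟩)
          · exact Or.inl ⟨hx1, by omega⟩
          · rcases List.mem_cons.mp hm with rfl | hm'
            · exact Or.inl ⟨by omega, by omega⟩
            · exact Or.inr ⟨iv, hm', hx⟩
      · have heq : pvRun (a :: t) cs ce = pvRun t cs ce := by
          unfold pvRun
          simp only [List.foldl_cons, pvMergeStep, if_neg h1, if_neg h2]
        rw [heq]
        have ih' := ih cs ce hle hvt hs'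
        refine ⟨ih'.1, ih'.2.1, ih'.2.2.1, fun x => ?_⟩
        rw [ih'.2.2.2 x]
        constructor
        · rintro (⟨hx1, hx2⟩ | ⟨iv, hm, hx⟩)
          · exact Or.inl ⟨hx1, hx2⟩
          · exact Or.inr ⟨iv, by simp [hm], hx⟩
        · rintro (⟨hx1, hx2⟩ | ⟨iv, hm, hx⟩)
          · exact Or.inl ⟨hx1, hx2⟩
          · rcases List.mem_cons.mp hm with rfl | hm'
            · exact Or.inl ⟨by omega, by omega⟩
            · exact Or.inr ⟨iv, hm', hx⟩

theorem pvPagesMem (m : List (Int × Int)) (x : Int) :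
    x ∈ m.flatMap (fun iv => PySem.List.pyRange iv.1 (iv.2 + 1) 1)
      ↔ ∃ iv ∈ m, iv.1 ≤ x ∧ x ≤ iv.2 := by
  simp only [List.mem_flatMap, PySem.List.mem_pyRange_one]
  constructor
  · rintro ⟨iv, hm, h1, h2⟩
    exact ⟨iv, hm, h1, by omega⟩
  · rintro ⟨iv, hm, h1, h2⟩
    exact ⟨iv, hm, h1, by omega⟩

theorem pvPagesPairwise (m : List (Int × Int))
    (hch : m.Pairwise (fun a b => a.2 + 1 < b.1)) :
    (m.flatMap (fun iv => PySem.List.pyRange iv.1 (iv.2 + 1) 1)).Pairwise (· < ·) := by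
  induction m with
  | nil => simp
  | cons a t ih =>
    rw [List.pairwise_cons] at hch
    rw [List.flatMap_cons, List.pairwise_append]
    refine ⟨PySem.List.pairwise_lt_pyRange_one _ _, ih hch.2, ?_⟩
    intro x hx y hy
    rw [PySem.List.mem_pyRange_one] at hx
    obtain ⟨iv, hm, hy1, hy2⟩ := (pvPagesMem t y).mp hy
    have := hch.1 iv hm
    omega

-- ===== VERDICT (by name: the statement is the Claim_ definition above) =====
theorem resolve_page_selection_spec : Claim_equal_resolve_page_selection := by
  intro total raw hDom hPre
  unfold Spec_resolve_page_selection
  cases raw with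
  | none =>
    have h0 : PySem.Str.strip "" = "" := by decide
    simp [resolve_page_selection, resolve_page_selection_alt, h0]
  | some s =>
    unfold Pre_resolve_page_selection at hPre
    simp only [Option.getD_some] at hPre
    by_cases hstrip : PySem.Str.strip s = ""
    · simp [resolve_page_selection, resolve_page_selection_alt, hstrip]
    · rcases hPre with h | ⟨hne, hok⟩
      · exact absurd h hstrip
      · have hA := pvAfold total (pvParts s) PySem.Set.empty hok
        have hB := pvBmapM total (pvParts s) hok
        have hivs_ne : (pvParts s).map pvToIv ≠ [] := by
          simpa using hne
        have hvalid : ∀ iv ∈ (pvParts s).map pvToIv,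
            1 ≤ iv.1 ∧ iv.1 ≤ iv.2 ∧ iv.2 ≤ total := by
          intro iv hiv
          rw [List.mem_map] at hiv
          obtain ⟨p, hp, rfl⟩ := hiv
          exact pvToIv_valid total p (hok p hp)
        have hperm := PySem.List.sorted_perm ((pvParts s).map pvToIv) (fun iv => iv.1) false
        have hsp := PySem.List.sorted_pairwise ((pvParts s).map pvToIv) (fun iv => iv.1)
        cases hsl : PySem.List.sorted ((pvParts s).map pvToIv) (fun iv => iv.1) false with
        | nil =>
          exact absurd ((PySem.List.sorted_eq_nil_iff _ _ false).mp hsl) hivs_ne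
        | cons iv0 rest =>
          rw [hsl] at hperm hsp
          have hmem_sl : ∀ iv, iv ∈ iv0 :: rest ↔ iv ∈ (pvParts s).map pvToIv :=
            fun iv => hperm.mem_iff
          have hv0 := hvalid iv0 ((hmem_sl iv0).mp (by simp))
          rw [List.pairwise_cons] at hsp
          have hrun := pvRunSpec rest iv0.1 iv0.2 hv0.2.1
            (fun iv hiv =>
              ⟨(hvalid iv ((hmem_sl iv).mp (by simp [hiv]))).2.1, hsp.1 iv hiv⟩) hsp.2
          have hmem : ∀ x,
              x ∈ (pvRun rest iv0.1 iv0.2).flatMap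
                    (fun iv => PySem.List.pyRange iv.1 (iv.2 + 1) 1)
                ↔ x ∈ ((pvParts s).map pvToIv).foldl
                      (fun S iv => PySem.Set.update S (PySem.List.pyRange iv.1 (iv.2 + 1) 1))
                      PySem.Set.empty := by
            intro x
            rw [pvPagesMem, hrun.2.2.2 x, pvMemAfold]
            constructor
            · rintro (hx | ⟨iv, hm, hx⟩)
              · exact Or.inr ⟨iv0, (hmem_sl iv0).mp (by simp), hx⟩
              · exact Or.inr ⟨iv, (hmem_sl iv).mp (by simp [hm]), hx⟩
            · rintro (h | ⟨iv, hm, hx⟩)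
              · simp [PySem.Set.empty] at h
              · rcases List.mem_cons.mp ((hmem_sl iv).mpr hm) with h' | hm'
                · exact Or.inl (h' ▸ hx)
                · exact Or.inr ⟨iv, hm', hx⟩
          have hpw := pvPagesPairwise (pvRun rest iv0.1 iv0.2) hrun.2.2.1
          have hnd_pages : ((pvRun rest iv0.1 iv0.2).flatMap
              (fun iv => PySem.List.pyRange iv.1 (iv.2 + 1) 1)).Nodup :=
            List.Pairwise.imp (fun h => ne_of_lt h) hpw
          have hnd_S := pvNodupAfold ((pvParts s).map pvToIv) PySem.Set.empty
            (by simp [PySem.Set.empty])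
          have hpermPS := (List.perm_ext_iff_of_nodup hnd_pages hnd_S).mpr hmem
          have hsorted := PySem.List.sorted_eq_of_perm_of_pairwise_lt _ _ (fun x : Int => x)
            hpermPS hpw
          have hcount : (((pvRun rest iv0.1 iv0.2).flatMap
                (fun iv => PySem.List.pyRange iv.1 (iv.2 + 1) 1)).length : Int)
              = PySem.Set.len (((pvParts s).map pvToIv).foldl
                  (fun S iv => PySem.Set.update S (PySem.List.pyRange iv.1 (iv.2 + 1) 1))
                  PySem.Set.empty) := by
            rw [PySem.Set.len, hpermPS.length_eq]
          show resolve_page_selection total (some s) = resolve_page_selection_alt total (some s)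
          simp only [resolve_page_selection, resolve_page_selection_alt, Option.getD_some]
          rw [if_neg hstrip, if_neg hstrip, if_neg hne, if_neg hne, hA, hB]
          simp only [hsl]
          show (some (PySem.Str.join ","
                  ((PySem.List.sorted _ (fun x => x) false).map PySem.Int.toStr)),
                PySem.Set.len _)
            = (some (PySem.Str.join ","
                  (((pvRun rest iv0.1 iv0.2).flatMap
                      (fun iv => PySem.List.pyRange iv.1 (iv.2 + 1) 1)).map PySem.Int.toStr)),
               (((pvRun rest iv0.1 iv0.2).flatMap
                      (fun iv => PySem.List.pyRange iv.1 (iv.2 + 1) 1)).length : Int))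
          rw [hsorted, hcount]
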